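-- pv_equiv track=rewrite | github.com/rpauts2/autopost | platforms/telegram/platform.py | _split_into_messages
-- ===== SOURCE A (Python) =====
-- def _split_into_messages(content: str, max_length: int = 4000) -> list[str]:
--     """Split content into multiple messages for thread."""
--     if len(content) <= max_length:
--         return [content]
--
--     # Try to split by paragraphs
--     paragraphs = content.split('\n\n')
--     messages = []
--     current_message = ""
--
--     for para in paragraphs:
--         if len(current_message) + len(para) + 2 <= max_length:
--             if current_message:
--                 current_message += "\n\n" + para
--             else:
--                 current_message = para
--         else:
--             if current_message:
--                 messages.append(current_message)
--             # If paragraph itself is too long, split it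
--             if len(para) > max_length:
--                 while len(para) > max_length:
--                     messages.append(para[:max_length])
--                     para = para[max_length:]
--                 current_message = para
--             else:
--                 current_message = para
--
--     if current_message:
--         messages.append(current_message)
--
--     return messages
-- ===== SOURCE B (Python) =====
-- def _split_into_messages(content: str, max_length: int = 4000) -> list[str]:
--     """Split content into multiple messages for thread."""
--     if len(content) <= max_length:
--         return [content]
--
--     def go(paras, pieces, plen):
--         # pieces: parts of the message under construction; plen = len('\n\n'.join(pieces))
--         if not paras:
--             return ['\n\n'.join(pieces)] if plen else []
--         para = paras[0]
--         if plen + len(para) + 2 <= max_length: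
--             if plen:
--                 return go(paras[1:], pieces + [para], plen + len(para) + 2)
--             return go(paras[1:], [para], len(para))
--         flushed = ['\n\n'.join(pieces)] if plen else []
--         if len(para) > max_length:
--             # closed-form chunking: k full max_length-sized chunks, then the tail
--             k = (len(para) - 1) // max_length
--             chunks = [para[i * max_length:(i + 1) * max_length] for i in range(k)]
--             tail = para[k * max_length:]
--             return flushed + chunks + go(paras[1:], [tail], len(tail))
--         return flushed + go(paras[1:], [para], len(para))
--
--     return go(content.split('\n\n'), [], 0)
-- ===== Notes on version B (the rewrite author's own statement) =====
-- stated objective: alternative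
-- what changed: A is an imperative state machine: a fold over paragraphs carrying (messages, current string), string-concatenating into current and chopping over-long paragraphs with an inner while loop; B is a recursive function over the paragraph list carrying a pieces list plus a running length, joining pieces only at flush time, and chopping over-long paragraphs in closed form (k = (len-1)//max_length full slices computed by a range comprehension plus the tail).
-- outside the precondition, e.g. on _split_into_messages('\n\n', 0): A returns [], B returns []
import Mathlib
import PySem

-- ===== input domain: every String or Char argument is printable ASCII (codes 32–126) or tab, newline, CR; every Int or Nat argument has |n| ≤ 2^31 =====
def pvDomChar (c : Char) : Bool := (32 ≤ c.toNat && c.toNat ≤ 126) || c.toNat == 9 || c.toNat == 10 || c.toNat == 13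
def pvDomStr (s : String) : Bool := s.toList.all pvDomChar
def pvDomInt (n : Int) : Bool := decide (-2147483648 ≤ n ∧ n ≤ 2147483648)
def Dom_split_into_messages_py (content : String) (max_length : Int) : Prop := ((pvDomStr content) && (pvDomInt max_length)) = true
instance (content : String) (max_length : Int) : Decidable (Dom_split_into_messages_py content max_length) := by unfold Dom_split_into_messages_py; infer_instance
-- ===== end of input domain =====

-- B replaces A's imperative state machine (fold carrying (messages, current string), concatenating
-- into current, inner while chopping long paragraphs) by a recursive function over the paragraph
-- list carrying a pieces list plus a running length, joining only at flush time, with closed-form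
-- chunking (k = (len-1)//max_length slices from a range comprehension plus the tail). Same cost.

-- ===== PORT A =====
-- A's inner 'while len(para) > max_length' loop; fuel = para's character count (a totality
-- device only: with 1 ≤ max_length each step strictly shortens para, so fuel never runs out
-- on inputs admitted by Pre_).
def pvWhileA (max_length : Int) : Nat → List (List Char) → List Char → List (List Char) × List Char
  | 0, msgs, para => (msgs, para)
  | fuel + 1, msgs, para =>
    if (para.length : Int) > max_length then
      pvWhileA max_length fuel (msgs ++ [PySem.List.slice para none (some max_length)])
        (PySem.List.slice para (some max_length) none)
    else (msgs, para)

-- the body of A's 'for para in paragraphs' loop; state = (messages, current_message)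
def pvStepA (max_length : Int) (st : List (List Char) × List Char) (para : List Char) :
    List (List Char) × List Char :=
  if (st.2.length : Int) + (para.length : Int) + 2 ≤ max_length then
    if st.2 ≠ [] then (st.1, st.2 ++ '\n' :: '\n' :: para) else (st.1, para)
  else
    let msgs := if st.2 ≠ [] then st.1 ++ [st.2] else st.1
    if (para.length : Int) > max_length then pvWhileA max_length para.length msgs para
    else (msgs, para)

def split_into_messages_py (content : String) (max_length : Int) : List String :=
  if (content.toList.length : Int) ≤ max_length then [content]
  else
    let st := (PySem.Chars.splitOn content.toList ['\n', '\n']).foldl (pvStepA max_length) ([], [])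
    (if st.2 ≠ [] then st.1 ++ [st.2] else st.1).map String.ofList

-- ===== PORT B =====
-- B's recursive 'go(paras, pieces, plen)': pieces are the parts of the message under
-- construction, plen = len('\n\n'.join(pieces)); Python's 'if plen:' is 'plen ≠ 0'.
def pvGoB (max_length : Int) : List (List Char) → List (List Char) → Int → List (List Char)
  | [], pieces, plen => if plen ≠ 0 then [PySem.Chars.join ['\n', '\n'] pieces] else []
  | para :: rest, pieces, plen =>
    if plen + (para.length : Int) + 2 ≤ max_length then
      if plen ≠ 0 then pvGoB max_length rest (pieces ++ [para]) (plen + (para.length : Int) + 2)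
      else pvGoB max_length rest [para] (para.length : Int)
    else
      let flushed := if plen ≠ 0 then [PySem.Chars.join ['\n', '\n'] pieces] else []
      if (para.length : Int) > max_length then
        let k := PySem.Int.floordiv ((para.length : Int) - 1) max_length
        let chunks := (PySem.List.pyRange 0 k 1).map (fun i =>
          PySem.List.slice para (some (i * max_length)) (some ((i + 1) * max_length)))
        let tail := PySem.List.slice para (some (k * max_length)) none
        flushed ++ chunks ++ pvGoB max_length rest [tail] (tail.length : Int)
      else
        flushed ++ pvGoB max_length rest [para] (para.length : Int)

def split_into_messages_py_alt (content : String) (max_length : Int) : List String :=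
  if (content.toList.length : Int) ≤ max_length then [content]
  else
    (pvGoB max_length (PySem.Chars.splitOn content.toList ['\n', '\n']) [] 0).map String.ofList

-- ===== PRECONDITION & SPEC =====
-- Pre_ excludes non-positive max_length on over-long content: there A's inner while no longer
-- shortens para, so A loops forever on any non-empty paragraph, and on the degenerate contents
-- whose paragraphs are all empty (pure '\n\n' repetitions) A returns an accidental [].
def Pre_split_into_messages_py (content : String) (max_length : Int) : Prop :=
  (content.toList.length : Int) ≤ max_length ∨ 1 ≤ max_length

instance (content : String) (max_length : Int) : Decidable (Pre_split_into_messages_py content max_length) := by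
  unfold Pre_split_into_messages_py; infer_instance

def pvWitness_split_into_messages_py : String × Int := ("aaa\n\nbb\n\nccccccc", 5)

def Spec_split_into_messages_py (content : String) (max_length : Int) (out : List String) : Prop := out = split_into_messages_py_alt content max_length
instance (content : String) (max_length : Int) (out : List String) : Decidable (Spec_split_into_messages_py content max_length out) := by unfold Spec_split_into_messages_py; infer_instance

-- ===== CLAIM (what is proved, stated in full; the proofs are below) =====
def Claim_equal_split_into_messages_py : Prop := ∀ (content : String) (max_length : Int), Dom_split_into_messages_py content max_length → Pre_split_into_messages_py content max_length → Spec_split_into_messages_py content max_length (split_into_messages_py content max_length)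

-- ===== LEMMAS AND PROOFS =====

-- A's finalizing step 'if current_message: messages.append(current_message)'
def pvFinA (st : List (List Char) × List Char) : List (List Char) :=
  if st.2 ≠ [] then st.1 ++ [st.2] else st.1

-- joining one more piece onto a non-empty pieces list
lemma pvJoinApp (sep : List Char) : ∀ (ps : List (List Char)) (p : List Char), ps ≠ [] →
    PySem.Chars.join sep (ps ++ [p]) = PySem.Chars.join sep ps ++ sep ++ p := by
  intro ps
  induction ps with
  | nil => intro p h; exact absurd rfl h
  | cons a ps ih =>
    intro p _
    cases ps with
    | nil =>
      simp [PySem.Chars.join_cons_cons, PySem.Chars.join_singleton]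
    | cons b qs =>
      have := ih p (by simp)
      simp only [List.cons_append, PySem.Chars.join_cons_cons] at this ⊢
      simp [this]

-- A's while loop stops immediately on a short paragraph
lemma pvWhileShort (max_length : Int) (fuel : Nat) (msgs : List (List Char)) (p : List Char)
    (h : ¬ (p.length : Int) > max_length) : pvWhileA max_length fuel msgs p = (msgs, p) := by
  cases fuel with
  | zero => rfl
  | succ n => simp only [pvWhileA]; rw [if_neg h]

-- chunk i of the m-shifted remainder is chunk i+1 of the original paragraph
lemma pvChunkShift (m : Int) (hm : 1 ≤ m) (p : List Char) (i : Int) (hi : 0 ≤ i) :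
    PySem.List.slice (PySem.List.slice p (some m) none) (some (i * m)) (some ((i + 1) * m))
      = PySem.List.slice p (some ((i + 1) * m)) (some ((i + 2) * m)) := by
  have ha : 0 ≤ i * m := mul_nonneg hi (by omega)
  rw [PySem.List.slice_from p (by omega)]
  rw [PySem.List.slice_toNat _ ha (mul_nonneg (by omega) (by omega))]
  rw [PySem.List.slice_toNat p (mul_nonneg (by omega) (by omega)) (mul_nonneg (by omega) (by omega))]
  rw [List.drop_drop]
  have e1 : (i + 1) * m = i * m + m := by ring
  have e2 : (i + 2) * m = i * m + m + m := by ring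
  rw [e1, e2]
  congr 1
  · omega
  · congr 1
    omega

-- the tail of the m-shifted remainder after k-1 chunks is the tail of the original after k
lemma pvTailShift (m : Int) (hm : 1 ≤ m) (p : List Char) (k : Int) (hk : 1 ≤ k) :
    PySem.List.slice (PySem.List.slice p (some m) none) (some ((k - 1) * m)) none
      = PySem.List.slice p (some (k * m)) none := by
  have ha : 0 ≤ (k - 1) * m := mul_nonneg (by omega) (by omega)
  rw [PySem.List.slice_from p (by omega)]
  rw [PySem.List.slice_from _ ha]
  rw [PySem.List.slice_from p (mul_nonneg (by omega) (by omega))]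
  rw [List.drop_drop]
  have e1 : k * m = (k - 1) * m + m := by ring
  rw [e1]
  congr 1
  omega

-- A's while loop in B's closed form: k = (len-1)//m full slices, then the tail
lemma pvWhileA_eq (m : Int) (hm : 1 ≤ m) :
    ∀ (fuel : Nat) (p : List Char) (msgs : List (List Char)),
      p.length ≤ fuel → (p.length : Int) > m →
      pvWhileA m fuel msgs p =
        (msgs ++ (PySem.List.pyRange 0 (PySem.Int.floordiv ((p.length : Int) - 1) m) 1).map
            (fun i => PySem.List.slice p (some (i * m)) (some ((i + 1) * m))),
         PySem.List.slice p (some ((PySem.Int.floordiv ((p.length : Int) - 1) m) * m)) none) := by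
  intro fuel
  induction fuel with
  | zero =>
    intro p msgs hf hlong
    have : p.length = 0 := Nat.le_zero.mp hf
    rw [this] at hlong
    simp at hlong
    omega
  | succ fuel ih =>
    intro p msgs hf hlong
    simp only [pvWhileA]
    rw [if_pos hlong]
    have hdrop : PySem.List.slice p (some m) none = p.drop m.toNat :=
      PySem.List.slice_from p (by omega)
    have hlen' : ((PySem.List.slice p (some m) none).length : Int) = (p.length : Int) - m := by
      rw [hdrop, List.length_drop]; omega
    by_cases h2 : ((PySem.List.slice p (some m) none).length : Int) > m
    · -- still long: recurse, k ≥ 2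
      have hk2 : 2 ≤ PySem.Int.floordiv ((p.length : Int) - 1) m := by
        rw [PySem.Int.le_floordiv_iff_mul_le (by omega)]; omega
      have hf' : (PySem.List.slice p (some m) none).length ≤ fuel := by
        rw [hdrop, List.length_drop]; omega
      rw [ih _ _ hf' h2]
      have hk' : PySem.Int.floordiv (((PySem.List.slice p (some m) none).length : Int) - 1) m
          = PySem.Int.floordiv ((p.length : Int) - 1) m - 1 := by
        rw [hlen']
        rw [PySem.Int.floordiv_eq_ediv_of_pos (by omega), PySem.Int.floordiv_eq_ediv_of_pos (by omega)]
        have h3 := Int.add_mul_ediv_right ((p.length : Int) - m - 1) 1 (show m ≠ 0 by omega)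
        have e4 : (p.length : Int) - m - 1 + 1 * m = (p.length : Int) - 1 := by ring
        rw [e4] at h3
        linarith
      rw [hk']
      simp only [Prod.mk.injEq]
      constructor
      · -- the chunk lists agree
        rw [PySem.List.pyRange_one_cons (show (0 : Int) < PySem.Int.floordiv ((p.length : Int) - 1) m by omega)]
        simp only [List.map_cons, List.append_assoc]
        congr 1
        rw [List.singleton_append]
        congr 1
        · -- the first chunk
          rw [show ((0 : Int)) * m = 0 by ring, show ((0 : Int) + 1) * m = m by ring]
          simp [PySem.List.slice_zero_start]
        · -- the shifted remaining chunks
          simp only [zero_add]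
          rw [PySem.List.pyRange_one 0 (PySem.Int.floordiv ((p.length : Int) - 1) m - 1),
              PySem.List.pyRange_one 1 (PySem.Int.floordiv ((p.length : Int) - 1) m)]
          simp only [List.map_map]
          have e7 : (PySem.Int.floordiv ((p.length : Int) - 1) m - 1 - 0).toNat
              = (PySem.Int.floordiv ((p.length : Int) - 1) m - 1).toNat := by omega
          rw [e7]
          apply List.map_congr_left
          intro j hj
          simp only [Function.comp_apply, zero_add]
          have hcs := pvChunkShift m hm p (j : Int) (by positivity)
          rw [hcs]
          rw [show ((1 : Int) + (j : Int)) = (j : Int) + 1 by ring,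
              show ((j : Int) + 1 + 1) = (j : Int) + 2 by ring]
      · -- the tails agree
        exact pvTailShift m hm p _ (by omega)
    · -- last step: remainder ≤ m, so k = 1
      rw [pvWhileShort m fuel _ _ h2]
      have hk1 : PySem.Int.floordiv ((p.length : Int) - 1) m = 1 := by
        rw [PySem.Int.floordiv_eq_iff_of_pos (by omega)]
        constructor
        · omega
        · have := hlen'; omega
      rw [hk1]
      have hr : PySem.List.pyRange 0 1 1 = [0] := by
        rw [PySem.List.pyRange_one_cons (by norm_num)]
        rw [PySem.List.pyRange_one_eq_nil (by norm_num)]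
      rw [hr]
      simp only [List.map_cons, List.map_nil, Prod.mk.injEq]
      constructor
      · congr 2
        rw [show (0 : Int) * m = 0 by ring, show ((0 : Int) + 1) * m = m by ring]
        simp [PySem.List.slice_zero_start]
      · rw [show (1 : Int) * m = m by ring]

-- main invariant: A's fold + finalize = msgs ++ B's go, when plen = len(join pieces)
lemma pvMain (m : Int) (hm : 1 ≤ m) :
    ∀ (paras msgs pieces : List (List Char)) (plen : Int),
      plen = ((PySem.Chars.join ['\n', '\n'] pieces).length : Int) →
      pvFinA (paras.foldl (pvStepA m) (msgs, PySem.Chars.join ['\n', '\n'] pieces))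
        = msgs ++ pvGoB m paras pieces plen := by
  intro paras
  induction paras with
  | nil =>
    intro msgs pieces plen hp
    simp only [List.foldl_nil, pvFinA, pvGoB]
    by_cases h : PySem.Chars.join ['\n', '\n'] pieces = []
    · rw [if_neg (by simpa using h), if_neg (by simp [hp, h])]
      simp
    · rw [if_pos (by simpa using h),
          if_pos (by rw [hp]; simpa [List.length_eq_zero_iff] using h)]
  | cons para rest ih =>
    intro msgs pieces plen hp
    have hiff : plen ≠ 0 ↔ PySem.Chars.join ['\n', '\n'] pieces ≠ [] := by
      rw [hp]; simp [List.length_eq_zero_iff]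
    simp only [List.foldl_cons]
    by_cases hfit : plen + (para.length : Int) + 2 ≤ m
    · have hfit' : ((PySem.Chars.join ['\n', '\n'] pieces).length : Int) + (para.length : Int) + 2 ≤ m := by
        rw [← hp]; exact hfit
      by_cases hne : PySem.Chars.join ['\n', '\n'] pieces ≠ []
      · have hst : pvStepA m (msgs, PySem.Chars.join ['\n', '\n'] pieces) para
            = (msgs, PySem.Chars.join ['\n', '\n'] pieces ++ '\n' :: '\n' :: para) := by
          unfold pvStepA
          rw [if_pos hfit', if_pos hne]
        have hps : pieces ≠ [] := by
          intro h; apply hne; rw [h, PySem.Chars.join_nil]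
        have hj : PySem.Chars.join ['\n', '\n'] pieces ++ '\n' :: '\n' :: para
            = PySem.Chars.join ['\n', '\n'] (pieces ++ [para]) := by
          rw [pvJoinApp _ pieces para hps]; simp
        rw [hst, hj, ih msgs (pieces ++ [para]) (plen + (para.length : Int) + 2)
          (by rw [← hj]; simp [hp]; ring)]
        conv_rhs => rw [pvGoB]
        rw [if_pos hfit, if_pos (hiff.mpr hne)]
      · rw [ne_eq, not_not] at hne
        have hst : pvStepA m (msgs, PySem.Chars.join ['\n', '\n'] pieces) para = (msgs, para) := by
          unfold pvStepA
          rw [if_pos hfit', if_neg (by simpa using hne)]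
        have hpara : para = PySem.Chars.join ['\n', '\n'] [para] :=
          (PySem.Chars.join_singleton _ _).symm
        rw [hst]
        conv_lhs => rw [hpara]
        rw [ih msgs [para] (para.length : Int) (by rw [← hpara])]
        conv_rhs => rw [pvGoB]
        rw [if_pos hfit, if_neg (by simpa [hiff] using hne)]
    · have hfit' : ¬ (((PySem.Chars.join ['\n', '\n'] pieces).length : Int) + (para.length : Int) + 2 ≤ m) := by
        rw [← hp]; exact hfit
      have hmsgs : (if PySem.Chars.join ['\n', '\n'] pieces ≠ [] then msgs ++ [PySem.Chars.join ['\n', '\n'] pieces] else msgs)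
          = msgs ++ (if plen ≠ 0 then [PySem.Chars.join ['\n', '\n'] pieces] else []) := by
        by_cases h : PySem.Chars.join ['\n', '\n'] pieces = []
        · rw [if_neg (by simpa using h), if_neg (by simp [hiff, h])]; simp
        · rw [if_pos (by simpa using h), if_pos (hiff.mpr h)]
      by_cases hlong : (para.length : Int) > m
      · have hst : pvStepA m (msgs, PySem.Chars.join ['\n', '\n'] pieces) para
            = pvWhileA m para.length
                (if PySem.Chars.join ['\n', '\n'] pieces ≠ [] then msgs ++ [PySem.Chars.join ['\n', '\n'] pieces] else msgs)
                para := by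
          unfold pvStepA
          rw [if_neg hfit', if_pos hlong]
        rw [hst, pvWhileA_eq m hm para.length para _ le_rfl hlong]
        have htail : PySem.List.slice para (some ((PySem.Int.floordiv ((para.length : Int) - 1) m) * m)) none
            = PySem.Chars.join ['\n', '\n'] [PySem.List.slice para (some ((PySem.Int.floordiv ((para.length : Int) - 1) m) * m)) none] :=
          (PySem.Chars.join_singleton _ _).symm
        conv_lhs => rw [htail]
        rw [ih _ [_] _ (by rw [← htail])]
        conv_rhs => rw [pvGoB]
        rw [if_neg hfit, if_pos hlong]
        simp only [hmsgs, List.append_assoc]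
      · have hst : pvStepA m (msgs, PySem.Chars.join ['\n', '\n'] pieces) para
            = ((if PySem.Chars.join ['\n', '\n'] pieces ≠ [] then msgs ++ [PySem.Chars.join ['\n', '\n'] pieces] else msgs), para) := by
          unfold pvStepA
          rw [if_neg hfit', if_neg hlong]
        have hpara : para = PySem.Chars.join ['\n', '\n'] [para] :=
          (PySem.Chars.join_singleton _ _).symm
        rw [hst]
        conv_lhs => rw [hpara]
        rw [ih _ [para] (para.length : Int) (by rw [← hpara])]
        conv_rhs => rw [pvGoB]
        rw [if_neg hfit, if_neg hlong]
        simp only [hmsgs, List.append_assoc]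

-- ===== VERDICT (by name: the statement is the Claim_ definition above) =====
theorem split_into_messages_py_spec : Claim_equal_split_into_messages_py := by
  intro content max_length _ hpre
  unfold Spec_split_into_messages_py split_into_messages_py split_into_messages_py_alt
  by_cases hshort : (content.toList.length : Int) ≤ max_length
  · rw [if_pos hshort, if_pos hshort]
  · rw [if_neg hshort, if_neg hshort]
    have h1 : 1 ≤ max_length := by
      rcases hpre with h | h
      · exact absurd h hshort
      · exact h
    have := pvMain max_length h1 (PySem.Chars.splitOn content.toList ['\n', '\n']) [] [] 0
      (by simp [PySem.Chars.join_nil])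
    simp only [PySem.Chars.join_nil, pvFinA, List.nil_append] at this
    exact congrArg (List.map String.ofList) this
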